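-- pv_equiv track=rewrite | github.com/seatedSinger/watchtower | Contests/Weekly/Weekly 291 - MAY/min consecutive cards pick.py | minCardPickup
-- ===== SOURCE A (Python) =====
-- def minCardPickup(cards):
--     seen, res = {}, float("inf")
--     L, R = 0, 0
--     smallest_card = float("inf")
--     while L < len(cards) and R < len(cards):
--         c = cards[R]
--         if c in seen:
--             L = seen[c] + 1
--             res = min(res, R - L)
--         seen[c] = R
--         R += 1
--     return -1 if res == float("inf") else res + 1
-- ===== SOURCE B (Python) =====
-- def minCardPickup(cards):
--     pos = {}
--     for i, c in enumerate(cards):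
--         pos.setdefault(c, []).append(i)
--     best = None
--     for idxs in pos.values():
--         for i, j in zip(idxs, idxs[1:]):
--             d = j - i
--             if best is None or d < best:
--                 best = d
--     return -1 if best is None else best
-- ===== Notes on version B (the rewrite author's own statement) =====
-- stated objective: alternative
-- what changed: Replaces A's single sliding pass with a last-seen dict (window L/R, running min at every duplicate) by a group-by-value index map built in one pass plus a pass over each value's index list taking the minimum consecutive-index difference.
import Mathlib
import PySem

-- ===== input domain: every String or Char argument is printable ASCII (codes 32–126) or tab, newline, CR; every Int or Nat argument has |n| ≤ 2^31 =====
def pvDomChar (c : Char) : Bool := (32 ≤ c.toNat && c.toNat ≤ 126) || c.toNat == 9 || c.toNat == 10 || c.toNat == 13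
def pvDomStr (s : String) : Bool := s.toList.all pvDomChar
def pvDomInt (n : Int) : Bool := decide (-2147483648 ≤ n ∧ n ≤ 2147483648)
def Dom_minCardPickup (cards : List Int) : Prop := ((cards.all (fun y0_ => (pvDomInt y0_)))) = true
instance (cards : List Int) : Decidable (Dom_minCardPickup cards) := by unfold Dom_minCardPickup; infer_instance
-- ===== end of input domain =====

-- B replaces A's sliding last-seen window with a group-by-value pass over per-value index lists (alternative decomposition, same result).

-- ===== PORT A =====
-- A's `smallest_card` variable is unused and dropped.  `res = inf` is modelled as `res = none`.
-- The loop guard `L < len(cards)` is kept literally (L : Int); R is the scan index, in range whenever read.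
def pvALoop (cards : List Int) (seen : PySem.Dict Int Int) (res : Option Int) (L : Int) (R : Nat) : Int :=
  if h : L < (cards.length : Int) ∧ R < cards.length then
    let c := cards[R]'h.2
    match seen.get? c with
    | some p =>
        let L' := p + 1
        let res' : Option Int := some (match res with
          | none => (R : Int) - L'
          | some r => min r ((R : Int) - L'))
        pvALoop cards (seen.insert c (R : Int)) res' L' (R + 1)
    | none => pvALoop cards (seen.insert c (R : Int)) res L (R + 1)
  else
    match res with
    | none => -1
    | some r => r + 1
termination_by cards.length - R
decreasing_by all_goals omega

def minCardPickup (cards : List Int) : Int :=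
  pvALoop cards PySem.Dict.empty none 0 0

-- ===== PORT B =====
-- zip(idxs, idxs[1:]) mapped to the difference j - i
def pvConsecDiffs (g : List Int) : List Int := List.zipWith (fun i j => j - i) g g.tail

-- `if best is None or d < best: best = d`
def pvBStep (b : Option Int) (d : Int) : Option Int :=
  match b with
  | none => some d
  | some r => if d < r then some d else b

-- the two nested `for` loops over pos.values()
def pvBestOf (gs : List (List Int)) : Option Int :=
  gs.foldl (fun b g => (pvConsecDiffs g).foldl pvBStep b) none

-- pos.setdefault(c, []).append(i)  ≡  pos[c] = pos.get(c, []) + [i]  (exact: same insertion order, same value)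
def pvBuildPos (cards : List Int) : PySem.Dict Int (List Int) :=
  (PySem.List.enumerate cards 0).foldl
    (fun pos p => pos.insert p.2 (pos.getD p.2 [] ++ [p.1])) PySem.Dict.empty

def minCardPickup_alt (cards : List Int) : Int :=
  match pvBestOf (pvBuildPos cards).values with
  | none => -1
  | some r => r

-- ===== PRECONDITION & SPEC =====
def Spec_minCardPickup (cards : List Int) (out : Int) : Prop := out = minCardPickup_alt cards
instance (cards : List Int) (out : Int) : Decidable (Spec_minCardPickup cards out) := by unfold Spec_minCardPickup; infer_instance

-- ===== CLAIM (what is proved, stated in full; the proofs are below) =====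
def Claim_equal_minCardPickup : Prop := ∀ (cards : List Int), Dom_minCardPickup cards → Spec_minCardPickup cards (minCardPickup cards)

-- ===== LEMMAS AND PROOFS =====

theorem pvBStep_eq (b : Option Int) (d : Int) : pvBStep b d = some (min (b.getD d) d) := by
  cases b <;> simp only [pvBStep, Option.getD_none, Option.getD_some, min_self]
  split_ifs <;> simp only [Option.some.injEq] <;> omega

theorem pvBStep_comm (b : Option Int) (d e : Int) :
    pvBStep (pvBStep b d) e = pvBStep (pvBStep b e) d := by
  cases b <;> simp only [pvBStep_eq, Option.getD_none, Option.getD_some, Option.some.injEq] <;> omega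

theorem foldl_pvBStep_comm (l : List Int) (b : Option Int) (e : Int) :
    l.foldl pvBStep (pvBStep b e) = pvBStep (l.foldl pvBStep b) e := by
  induction l generalizing b with
  | nil => rfl
  | cons d t ih =>
      rw [List.foldl_cons, List.foldl_cons, ← pvBStep_comm b d e, ih]

theorem foldl_F_comm (gs : List (List Int)) (b : Option Int) (e : Int) :
    gs.foldl (fun b g => (pvConsecDiffs g).foldl pvBStep b) (pvBStep b e)
      = pvBStep (gs.foldl (fun b g => (pvConsecDiffs g).foldl pvBStep b) b) e := by
  induction gs generalizing b with
  | nil => rfl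
  | cons g t ih => simp only [List.foldl_cons, foldl_pvBStep_comm, ih]

theorem pvConsecDiffs_concat (g : List Int) (p x : Int) (h : g.getLast? = some p) :
    pvConsecDiffs (g ++ [x]) = pvConsecDiffs g ++ [x - p] := by
  induction g with
  | nil => simp at h
  | cons a t ih =>
      cases t with
      | nil => simp at h; subst h; rfl
      | cons b t' =>
          have h' : (b :: t').getLast? = some p := by
            simpa [List.getLast?_cons_cons] using h
          simpa [pvConsecDiffs, List.zipWith] using ih h'

theorem foldl_F_update (items : List (Int × List Int)) (b : Option Int) (c : Int)
    (d : List Int) (p x : Int)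
    (hnd : (items.map (·.1)).Nodup) (hmem : (c, d) ∈ items) (hlast : d.getLast? = some p) :
    ((items.map (fun q => if q.1 == c then (c, d ++ [x]) else q)).map (·.2)).foldl
        (fun b g => (pvConsecDiffs g).foldl pvBStep b) b
      = pvBStep ((items.map (·.2)).foldl (fun b g => (pvConsecDiffs g).foldl pvBStep b) b) (x - p) := by
  induction items generalizing b with
  | nil => simp at hmem
  | cons q t ih =>
      rw [List.map_cons, List.nodup_cons] at hnd
      obtain ⟨hq, hndt⟩ := hnd
      by_cases hc : q.1 = c
      · have hd : q = (c, d) := by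
          rcases List.mem_cons.1 hmem with hmem | hmem
          · exact hmem.symm
          · have hcm : c ∈ List.map (fun x => x.1) t := List.mem_map.2 ⟨(c, d), hmem, rfl⟩
            rw [hc] at hq
            exact absurd hcm hq
        subst hd
        have hfresh : ∀ q' ∈ t, (fun q : Int × List Int => if q.1 == c then (c, d ++ [x]) else q) q' = q' := by
          intro q' hq'
          have hne : q'.1 ≠ c := fun hcontra => hq (hcontra ▸ List.mem_map.2 ⟨q', hq', rfl⟩)
          simp [hne]
        simp only [List.map_cons, List.foldl_cons, beq_self_eq_true, if_pos, List.map_congr_left hfresh]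
        rw [pvConsecDiffs_concat d p x hlast, List.foldl_append]
        simp only [List.foldl_cons, List.foldl_nil]
        simpa using foldl_F_comm (t.map (fun x => x.2)) _ (x - p)
      · have hmem' : (c, d) ∈ t := by
          rcases List.mem_cons.1 hmem with hmem | hmem
          · exact absurd (congrArg Prod.fst hmem).symm hc
          · exact hmem
        have hb : (q.1 == c) = false := by simpa using hc
        simp only [List.map_cons, List.foldl_cons, hb, if_neg, Bool.false_eq_true, not_false_iff]
        exact ih _ hndt hmem'

theorem foldl_F_fresh (vals : List (List Int)) (b : Option Int) (x : Int) :
    (vals ++ [[x]]).foldl (fun b g => (pvConsecDiffs g).foldl pvBStep b) b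
      = vals.foldl (fun b g => (pvConsecDiffs g).foldl pvBStep b) b := by
  simp [List.foldl_append, pvConsecDiffs]

-- main invariant: A's loop state (seen, res, L) at index R corresponds to B's partially-built dict pos
theorem pvLoop_inv (cards : List Int) :
    ∀ (n R : Nat) (seen : PySem.Dict Int Int) (pos : PySem.Dict Int (List Int))
      (res : Option Int) (L : Int),
      cards.length - R ≤ n →
      pos.keys.Nodup →
      (∀ v, seen.get? v = (pos.get? v).bind List.getLast?) →
      (∀ v g, pos.get? v = some g → g ≠ []) →
      (∀ v p, seen.get? v = some p → p < (R : Int)) →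
      res = (pvBestOf pos.values).map (· - 1) →
      L ≤ (R : Int) →
      pvALoop cards seen res L R =
        (match pvBestOf (((PySem.List.enumerate (cards.drop R) (R : Int)).foldl
            (fun pos p => pos.insert p.2 (pos.getD p.2 [] ++ [p.1])) pos)).values with
          | none => -1
          | some r => r) := by
  intro n
  induction n with
  | zero =>
      intro R seen pos res L hn hnd h1 h2 h3 hres hL
      have hR : cards.length ≤ R := by omega
      rw [pvALoop.eq_def, dif_neg (by omega)]
      rw [List.drop_eq_nil_of_le hR]
      cases hb : pvBestOf pos.values <;> simp [PySem.List.enumerate_nil, hres, hb]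
  | succ n ih =>
      intro R seen pos res L hn hnd h1 h2 h3 hres hL
      by_cases hR : R < cards.length
      · have hg : L < (cards.length : Int) ∧ R < cards.length := ⟨by omega, hR⟩
        rw [pvALoop.eq_def, dif_pos hg]
        have hdrop : cards.drop R = cards[R] :: cards.drop (R + 1) :=
          List.drop_eq_getElem_cons hR
        rw [hdrop, PySem.List.enumerate_cons, List.foldl_cons]
        have hcast : (R : Int) + 1 = ((R + 1 : Nat) : Int) := by push_cast; ring
        rw [hcast]
        set c := cards[R] with hc
        cases hsee : seen.get? c with
        | some p =>
            simp only [hsee]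
            have h1c := h1 c
            rw [hsee] at h1c
            cases hpos : pos.get? c with
            | none => rw [hpos] at h1c; simp at h1c
            | some d =>
                rw [hpos] at h1c
                have hlast : d.getLast? = some p := h1c.symm
                have hgetD : pos.getD c [] = d := by rw [PySem.Dict.getD_eq_get?_getD, hpos]; rfl
                have hcont : pos.contains c = true := by
                  rw [PySem.Dict.contains_eq_isSome_get?, hpos]; rfl
                have hpR : p < (R : Int) := h3 c p hsee
                -- the updated dict
                have hbest : pvBestOf (pos.insert c (pos.getD c [] ++ [(R : Int)])).values
                    = pvBStep (pvBestOf pos.values) ((R : Int) - p) := by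
                  have hit : (pos.insert c (d ++ [(R : Int)])).items
                      = pos.items.map (fun q => if q.1 == c then (c, d ++ [(R : Int)]) else q) := by
                    rw [PySem.Dict.items_insert, hcont]
                    simp
                  have hkeys : (pos.items.map (·.1)).Nodup := by
                    simpa [PySem.Dict.keys] using hnd
                  have hmem : (c, d) ∈ pos.items := PySem.Dict.mem_items_of_get?_eq_some pos hpos
                  simp only [pvBestOf, PySem.Dict.values, hit, hgetD]
                  exact foldl_F_update pos.items none c d p ((R : Int)) hkeys hmem hlast
                refine (ih (R + 1) (seen.insert c (R : Int))
                    (pos.insert c (pos.getD c [] ++ [(R : Int)])) _ _ (by omega) ?_ ?_ ?_ ?_ ?_ ?_)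
                · exact PySem.Dict.nodup_keys_insert pos c _ hnd
                · intro v
                  by_cases hv : v = c
                  · subst hv
                    rw [PySem.Dict.get?_insert_self, PySem.Dict.get?_insert_self, hgetD]
                    simp
                  · rw [PySem.Dict.get?_insert_of_ne _ _ hv, PySem.Dict.get?_insert_of_ne _ _ hv]
                    exact h1 v
                · intro v g hg'
                  by_cases hv : v = c
                  · subst hv
                    rw [PySem.Dict.get?_insert_self] at hg'
                    simp only [Option.some.injEq] at hg'
                    subst hg'
                    simp
                  · rw [PySem.Dict.get?_insert_of_ne _ _ hv] at hg'
                    exact h2 v g hg'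
                · intro v q hq'
                  by_cases hv : v = c
                  · subst hv
                    rw [PySem.Dict.get?_insert_self] at hq'
                    simp only [Option.some.injEq] at hq'
                    push_cast
                    omega
                  · rw [PySem.Dict.get?_insert_of_ne _ _ hv] at hq'
                    have := h3 v q hq'
                    push_cast
                    omega
                · rw [hbest]
                  cases hb : pvBestOf pos.values with
                  | none =>
                      rw [hb] at hres
                      simp only [Option.map_none] at hres
                      subst hres
                      simp only [pvBStep, Option.map_some, Option.some.injEq]
                      omega
                  | some bv =>
                      rw [hb] at hres
                      simp only [Option.map_some] at hres
                      subst hres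
                      rw [pvBStep_eq]
                      simp only [Option.getD_some, Option.map_some, Option.some.injEq]
                      omega
                · push_cast
                  omega
        | none =>
            simp only [hsee]
            have h1c := h1 c
            rw [hsee] at h1c
            have hpos : pos.get? c = none := by
              cases hpos : pos.get? c with
              | none => rfl
              | some d =>
                  rw [hpos] at h1c
                  simp only [Option.bind_some] at h1c
                  exact absurd (List.getLast?_eq_none_iff.1 h1c.symm) (h2 c d hpos)
            have hcont : pos.contains c = false := by
              rw [PySem.Dict.contains_eq_isSome_get?, hpos]; rfl
            have hgetD : pos.getD c [] = [] := by rw [PySem.Dict.getD_eq_get?_getD, hpos]; rfl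
            have hbest : pvBestOf (pos.insert c (pos.getD c [] ++ [(R : Int)])).values
                = pvBestOf pos.values := by
              have hit : (pos.insert c [(R : Int)]).items
                  = pos.items ++ [(c, [(R : Int)])] := by
                rw [PySem.Dict.items_insert, hcont]
                simp
              simp only [pvBestOf, PySem.Dict.values, hgetD, List.nil_append, hit, List.map_append]
              exact foldl_F_fresh (pos.items.map (fun x => x.2)) none ((R : Int))
            refine (ih (R + 1) (seen.insert c (R : Int))
                (pos.insert c (pos.getD c [] ++ [(R : Int)])) _ _ (by omega) ?_ ?_ ?_ ?_ ?_ ?_)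
            · exact PySem.Dict.nodup_keys_insert pos c _ hnd
            · intro v
              by_cases hv : v = c
              · subst hv
                rw [PySem.Dict.get?_insert_self, PySem.Dict.get?_insert_self, hgetD]
                simp
              · rw [PySem.Dict.get?_insert_of_ne _ _ hv, PySem.Dict.get?_insert_of_ne _ _ hv]
                exact h1 v
            · intro v g hg'
              by_cases hv : v = c
              · subst hv
                rw [PySem.Dict.get?_insert_self] at hg'
                simp only [Option.some.injEq] at hg'
                subst hg'
                simp
              · rw [PySem.Dict.get?_insert_of_ne _ _ hv] at hg'
                exact h2 v g hg'
            · intro v q hq'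
              by_cases hv : v = c
              · subst hv
                rw [PySem.Dict.get?_insert_self] at hq'
                simp only [Option.some.injEq] at hq'
                push_cast
                omega
              · rw [PySem.Dict.get?_insert_of_ne _ _ hv] at hq'
                have := h3 v q hq'
                push_cast
                omega
            · rw [hbest]
              exact hres
            · push_cast
              omega
      · rw [pvALoop.eq_def, dif_neg (by omega)]
        rw [List.drop_eq_nil_of_le (by omega)]
        cases hb : pvBestOf pos.values <;> simp [PySem.List.enumerate_nil, hres, hb]


-- ===== VERDICT (by name: the statement is the Claim_ definition above) =====
theorem minCardPickup_spec : Claim_equal_minCardPickup := by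
  intro cards _
  show minCardPickup cards = minCardPickup_alt cards
  have h := pvLoop_inv cards cards.length 0 PySem.Dict.empty PySem.Dict.empty none 0
    (by omega)
    (by simp [PySem.Dict.keys_empty])
    (by intro v; simp [PySem.Dict.get?_empty])
    (by intro v g hg; simp [PySem.Dict.get?_empty] at hg)
    (by intro v p hp; simp [PySem.Dict.get?_empty] at hp)
    (by simp [pvBestOf, PySem.Dict.values, PySem.Dict.empty])
    (by omega)
  simpa [minCardPickup, minCardPickup_alt, pvBuildPos] using h
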